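-- pv_equiv track=rewrite | github.com/lidongdongbuaa/leetcode2.0 | 数据结构与算法基础/leetcode周赛/200126/Filter Restaurants by Vegan-Friendly, Price and Distance.py | filterRestaurants
-- ===== SOURCE A (Python) =====
-- def filterRestaurants(restaurants, veganFriendly, maxPrice, maxDistance) :
--     veg = []
--     if veganFriendly == 1:
--         for elem in restaurants:  # scan veganFriendly
--             if elem[2] == veganFriendly:
--                 veg.append(elem)
--     else:
--         veg = restaurants
--
--     maxP = []
--     for elem in veg:  # scan price
--         if elem[3] <= maxPrice:
--             maxP.append(elem)
--
--     maxD = []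
--     for elem in maxP:
--         if elem[4] <= maxDistance:
--             maxD.append(elem)
--
--     if maxD == []:
--         return []
--
--     maxD.sort(key = lambda x: (x[1], x[0]), reverse= True)
--     # maxD.sort(key = lambda x: x[0], reverse= True)
--     return [elem[0] for elem in maxD]
-- ===== SOURCE B (Python) =====
-- def _insert(ranked, p):
--     # insert pair p into the ascending-sorted list ranked, after any equal pairs
--     if not ranked or p < ranked[0]:
--         return [p] + ranked
--     return [ranked[0]] + _insert(ranked[1:], p)
--
-- def filterRestaurants(restaurants, veganFriendly, maxPrice, maxDistance):
--     # online insertion sort: one pass, keep an ascending-sorted list of (rating, id)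
--     # pairs of the admissible restaurants; no call to sort at all
--     ranked = []
--     for r in restaurants:
--         if (veganFriendly != 1 or r[2] == 1) and r[3] <= maxPrice and r[4] <= maxDistance:
--             ranked = _insert(ranked, (r[1], r[0]))
--     return [i for _, i in reversed(ranked)]
-- ===== Notes on version B (the rewrite author's own statement) =====
-- stated objective: alternative
-- what changed: A's three staged filter passes plus a batch library sort are replaced by an online insertion sort: one pass over the input that inserts each admissible restaurant's (rating, id) pair into an accumulator kept sorted ascending by a hand-written recursive insertion (no sort call), emitting the ids from the reversed accumulator.
import Mathlib
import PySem

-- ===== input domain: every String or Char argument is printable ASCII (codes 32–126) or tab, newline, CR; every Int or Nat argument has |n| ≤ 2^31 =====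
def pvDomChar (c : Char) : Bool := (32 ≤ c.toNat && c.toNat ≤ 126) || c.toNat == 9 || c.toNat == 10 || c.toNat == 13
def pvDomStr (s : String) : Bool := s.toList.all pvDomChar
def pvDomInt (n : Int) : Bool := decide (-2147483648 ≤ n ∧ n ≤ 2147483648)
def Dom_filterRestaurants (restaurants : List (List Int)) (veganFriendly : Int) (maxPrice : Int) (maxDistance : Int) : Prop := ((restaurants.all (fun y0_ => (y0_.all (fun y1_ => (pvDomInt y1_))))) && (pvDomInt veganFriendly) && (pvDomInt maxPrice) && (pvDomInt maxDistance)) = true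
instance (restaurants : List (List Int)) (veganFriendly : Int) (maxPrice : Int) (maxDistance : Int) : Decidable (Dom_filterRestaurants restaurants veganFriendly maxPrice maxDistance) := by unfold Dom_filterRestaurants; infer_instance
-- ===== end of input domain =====

-- B replaces A's staged filters + batch sort by an online insertion sort: one pass inserting
-- each admissible (rating, id) pair into an ascending sorted accumulator (objective: alternative).


-- ===== PORT A =====
def filterRestaurants (restaurants : List (List Int)) (veganFriendly : Int) (maxPrice : Int) (maxDistance : Int) : List Int :=
  let veg : List (List Int) :=
    if veganFriendly = 1 then
      restaurants.foldl (fun acc elem =>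
        if PySem.List.pyGetD elem 2 0 = veganFriendly then acc ++ [elem] else acc) []
    else restaurants
  let maxP : List (List Int) :=
    veg.foldl (fun acc elem =>
      if PySem.List.pyGetD elem 3 0 ≤ maxPrice then acc ++ [elem] else acc) []
  let maxD : List (List Int) :=
    maxP.foldl (fun acc elem =>
      if PySem.List.pyGetD elem 4 0 ≤ maxDistance then acc ++ [elem] else acc) []
  if maxD = [] then []
  else
    (PySem.List.sorted2 maxD
        (fun x => PySem.List.pyGetD x 1 0) (fun x => PySem.List.pyGetD x 0 0) true).map
      (fun elem => PySem.List.pyGetD elem 0 0)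

-- ===== PORT B =====
-- _insert: recursive insertion of a pair into an ascending sorted list, after equal pairs
-- (Python tuple '<' is lexicographic: p < q iff p.1 < q.1 or (p.1 = q.1 and p.2 < q.2))
def insertAsc : List (Int × Int) → (Int × Int) → List (Int × Int)
  | [], p => [p]
  | q :: t, p =>
      if decide (p.1 < q.1 ∨ (p.1 = q.1 ∧ p.2 < q.2)) then p :: q :: t
      else q :: insertAsc t p

def filterRestaurants_alt (restaurants : List (List Int)) (veganFriendly : Int) (maxPrice : Int) (maxDistance : Int) : List Int :=
  let ranked : List (Int × Int) :=
    restaurants.foldl (fun ranked r =>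
      if decide ((veganFriendly ≠ 1 ∨ PySem.List.pyGetD r 2 0 = 1)
          ∧ PySem.List.pyGetD r 3 0 ≤ maxPrice
          ∧ PySem.List.pyGetD r 4 0 ≤ maxDistance)
      then insertAsc ranked (PySem.List.pyGetD r 1 0, PySem.List.pyGetD r 0 0)
      else ranked) []
  ranked.reverse.map Prod.snd

-- ===== PRECONDITION & SPEC =====
-- Pre_ excludes exactly the inputs on which the Python A raises IndexError: a row that
-- survives the accesses actually performed must be long enough at each access.
def Pre_filterRestaurants (restaurants : List (List Int)) (veganFriendly : Int) (maxPrice : Int) (maxDistance : Int) : Prop :=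
  ∀ r ∈ restaurants,
    (veganFriendly = 1 → 3 ≤ r.length) ∧
    ((veganFriendly ≠ 1 ∨ r.getD 2 0 = 1) →
      4 ≤ r.length ∧ (r.getD 3 0 ≤ maxPrice → 5 ≤ r.length))
instance (restaurants : List (List Int)) (veganFriendly : Int) (maxPrice : Int) (maxDistance : Int) : Decidable (Pre_filterRestaurants restaurants veganFriendly maxPrice maxDistance) := by unfold Pre_filterRestaurants; infer_instance

def pvWitness_filterRestaurants : List (List Int) × Int × Int × Int :=
  ([[10, 3, 1, 5, 2], [7, 9, 0, 1, 1]], 1, 10, 10)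

def Spec_filterRestaurants (restaurants : List (List Int)) (veganFriendly : Int) (maxPrice : Int) (maxDistance : Int) (out : List Int) : Prop := out = filterRestaurants_alt restaurants veganFriendly maxPrice maxDistance
instance (restaurants : List (List Int)) (veganFriendly : Int) (maxPrice : Int) (maxDistance : Int) (out : List Int) : Decidable (Spec_filterRestaurants restaurants veganFriendly maxPrice maxDistance out) := by unfold Spec_filterRestaurants; infer_instance

-- ===== CLAIM (what is proved, stated in full; the proofs are below) =====
def Claim_equal_filterRestaurants : Prop := ∀ (restaurants : List (List Int)) (veganFriendly : Int) (maxPrice : Int) (maxDistance : Int), Dom_filterRestaurants restaurants veganFriendly maxPrice maxDistance → Pre_filterRestaurants restaurants veganFriendly maxPrice maxDistance → Spec_filterRestaurants restaurants veganFriendly maxPrice maxDistance (filterRestaurants restaurants veganFriendly maxPrice maxDistance)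

-- ===== LEMMAS AND PROOFS =====

-- B's hand-written insertion is insertBy with the lexicographic strictly-less comparator
def bAsc (a b : Int × Int) : Bool := decide (a.1 < b.1 ∨ (a.1 = b.1 ∧ a.2 < b.2))

lemma insertAsc_eq_insertBy (l : List (Int × Int)) (p : Int × Int) :
    insertAsc l p = PySem.List.insertBy bAsc p l := by
  induction l with
  | nil => rfl
  | cons q t ih =>
      simp only [insertAsc, PySem.List.insertBy, bAsc]
      by_cases h : (p.1 < q.1 ∨ (p.1 = q.1 ∧ p.2 < q.2)) <;> simp [h, ih]

-- inserting is a permutation of consing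
lemma insertBy_perm {α : Type} (b : α → α → Bool) (x : α) (l : List α) :
    (PySem.List.insertBy b x l).Perm (x :: l) := by
  induction l with
  | nil => exact List.Perm.refl _
  | cons y t ih =>
      simp only [PySem.List.insertBy]
      by_cases h : b x y <;> simp only [h, if_true]
      · exact List.Perm.refl _
      · exact (ih.cons y).trans (List.Perm.swap x y t)

lemma foldl_insertBy_perm {α : Type} (b : α → α → Bool) :
    ∀ (l : List α) (acc : List α),
      (l.foldl (fun a x => PySem.List.insertBy b x a) acc).Perm (acc ++ l) := by
  intro l
  induction l with
  | nil => intro acc; simp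
  | cons x t ih =>
      intro acc
      simp only [List.foldl_cons]
      exact (ih _).trans (((insertBy_perm b x acc).append_right t).trans
        List.perm_middle.symm)

-- inserting preserves Pairwise R for a transitive R the comparator decides totally
lemma insertBy_pairwise {α : Type} (R : α → α → Prop) (htrans : Transitive R)
    (b : α → α → Bool)
    (h1 : ∀ x y, b x y = true → R x y) (h2 : ∀ x y, b x y = false → R y x)
    (x : α) (l : List α) (hl : l.Pairwise R) :
    (PySem.List.insertBy b x l).Pairwise R := by
  induction l with
  | nil => simp [PySem.List.insertBy]
  | cons y t ih =>
      rcases List.pairwise_cons.mp hl with ⟨hy, ht⟩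
      simp only [PySem.List.insertBy]
      by_cases h : b x y = true
      · simp only [if_pos h]
        refine List.pairwise_cons.mpr ⟨?_, hl⟩
        intro z hz
        rcases List.mem_cons.mp hz with rfl | hz
        · exact h1 x z h
        · exact htrans (h1 x y h) (hy z hz)
      · simp only [if_neg h]
        refine List.pairwise_cons.mpr ⟨?_, ih ht⟩
        intro z hz
        rcases (PySem.List.mem_insertBy _ _ _ _).mp hz with rfl | hz
        · exact h2 z y (eq_false_of_ne_true h)
        · exact hy z hz

lemma foldl_insertBy_pairwise {α : Type} (R : α → α → Prop) (htrans : Transitive R)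
    (b : α → α → Bool)
    (h1 : ∀ x y, b x y = true → R x y) (h2 : ∀ x y, b x y = false → R y x) :
    ∀ (l : List α) (acc : List α), acc.Pairwise R →
      (l.foldl (fun a x => PySem.List.insertBy b x a) acc).Pairwise R := by
  intro l
  induction l with
  | nil => intro acc h; simpa using h
  | cons x t ih =>
      intro acc h
      simp only [List.foldl_cons]
      exact ih _ (insertBy_pairwise R htrans b h1 h2 x acc h)

-- the lexicographic (rating, id) order, as an injective key into Lex (Int × Int)
def pairKey (p : Int × Int) : Lex (Int × Int) := toLex (-p.1, -p.2)

lemma pairKey_le_iff (a b : Int × Int) :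
    pairKey a ≤ pairKey b ↔ (b.1 < a.1 ∨ (b.1 = a.1 ∧ b.2 ≤ a.2)) := by
  unfold pairKey
  rw [Prod.Lex.le_iff]
  constructor <;> intro h <;> rcases h with h | ⟨h1, h2⟩ <;> simp_all

lemma pairKey_injective : Function.Injective pairKey := by
  intro a b h
  unfold pairKey at h
  have h' := congrArg (fun x => ofLex x) h
  simp only [ofLex_toLex] at h'
  cases a; cases b
  simp only [Prod.mk.injEq] at h' ⊢
  omega

-- descending-lex comparator used by sorted2 with reverse=True (new element goes AFTER equals)
def bDesc (x y : Int × Int) : Bool :=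
  decide (y.1 < x.1) || (!decide (x.1 < y.1) && decide (y.2 < x.2))

-- the reverse=True tuple-key sort IS the foldl of insertBy bDesc (definitional)
lemma sorted2_pairs_eq_foldl (P : List (Int × Int)) :
    PySem.List.sorted2 P Prod.fst Prod.snd true
      = P.foldl (fun acc x => PySem.List.insertBy bDesc x acc) [] := rfl

-- CORE: the reversed online ascending insertion equals the batch descending sort
lemma fold_asc_reverse_eq (P : List (Int × Int)) :
    PySem.List.sorted2 P Prod.fst Prod.snd true
      = (P.foldl insertAsc []).reverse := by
  have hfa : insertAsc = (fun (a : List (Int × Int)) (x : Int × Int) => PySem.List.insertBy bAsc x a) := by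
    funext a x; exact insertAsc_eq_insertBy a x
  rw [sorted2_pairs_eq_foldl, hfa]
  have hperm : (P.foldl (fun acc x => PySem.List.insertBy bDesc x acc) []).Perm
      ((P.foldl (fun acc x => PySem.List.insertBy bAsc x acc) []).reverse) := by
    refine (foldl_insertBy_perm bDesc P []).trans (List.Perm.symm ?_)
    exact (List.reverse_perm _).trans (foldl_insertBy_perm bAsc P [])
  have htrans : Transitive (fun a b : Int × Int => pairKey a ≤ pairKey b) :=
    fun a b c hab hbc => le_trans hab hbc
  have hdesc : (P.foldl (fun acc x => PySem.List.insertBy bDesc x acc) []).Pairwise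
      (fun a b => pairKey a ≤ pairKey b) := by
    refine foldl_insertBy_pairwise _ htrans bDesc ?_ ?_ P [] (by simp)
    · intro x y h
      rw [pairKey_le_iff]
      simp only [bDesc, Bool.or_eq_true, Bool.and_eq_true, Bool.not_eq_eq_eq_not,
        Bool.not_true, decide_eq_true_eq, decide_eq_false_iff_not] at h
      omega
    · intro x y h
      rw [pairKey_le_iff]
      simp only [bDesc, Bool.or_eq_false_iff, Bool.and_eq_false_iff, Bool.not_eq_eq_eq_not,
        Bool.not_false, decide_eq_true_eq, decide_eq_false_iff_not] at h
      omega
  have hasc : ((P.foldl (fun acc x => PySem.List.insertBy bAsc x acc) []).reverse).Pairwise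
      (fun a b => pairKey a ≤ pairKey b) := by
    rw [List.pairwise_reverse]
    refine foldl_insertBy_pairwise (fun a b : Int × Int => pairKey b ≤ pairKey a)
      (fun a b c hab hbc => le_trans hbc hab) bAsc ?_ ?_ P [] (by simp)
    · intro x y h
      rw [pairKey_le_iff]
      simp only [bAsc, decide_eq_true_eq] at h
      omega
    · intro x y h
      rw [pairKey_le_iff]
      simp only [bAsc, decide_eq_false_iff_not] at h
      omega
  exact PySem.List.eq_of_perm_of_pairwise_le_of_injective pairKey pairKey_injective
    hperm hdesc hasc

-- a guarded fold over the raw list is a fold over the filtered, projected list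
lemma foldl_filter_map {α β γ : Type} (p : α → Bool) (g : α → β) (f : γ → β → γ) :
    ∀ (l : List α) (acc : γ),
      l.foldl (fun a x => if p x then f a (g x) else a) acc
        = ((l.filter p).map g).foldl f acc := by
  intro l
  induction l with
  | nil => intro acc; rfl
  | cons x t ih =>
      intro acc
      by_cases h : p x <;> simp [h, ih]

-- inserting a mapped element into a mapped list is mapping the insertion (the comparator
-- looks only at images under g)
lemma insertBy_map {α β : Type} (g : α → β) (b : β → β → Bool) (x : α) (ys : List α) :
    PySem.List.insertBy b (g x) (ys.map g)
      = (PySem.List.insertBy (fun a a' => b (g a) (g a')) x ys).map g := by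
  induction ys with
  | nil => rfl
  | cons y t ih =>
      simp only [List.map_cons, PySem.List.insertBy]
      by_cases h : b (g x) (g y) <;> simp [h, ih]

lemma foldl_insertBy_map {α β : Type} (g : α → β) (b : β → β → Bool) :
    ∀ (l : List α) (acc : List α),
      (l.map g).foldl (fun a x => PySem.List.insertBy b x a) (acc.map g)
        = (l.foldl (fun a x => PySem.List.insertBy (fun p q => b (g p) (g q)) x a) acc).map g := by
  intro l
  induction l with
  | nil => intro acc; rfl
  | cons x t ih =>
      intro acc
      simp only [List.map_cons, List.foldl_cons]
      rw [insertBy_map g b x acc, ih]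

-- a stable tuple-key sort of a mapped list is the map of the sort by the composed keys
lemma sorted2_map {α β : Type} (g : α → β) (k1 : β → Int) (k2 : β → Int) (l : List α) :
    PySem.List.sorted2 (l.map g) k1 k2 true
      = (PySem.List.sorted2 l (fun x => k1 (g x)) (fun x => k2 (g x)) true).map g := by
  show (l.map g).foldl _ (([] : List α).map g) = _
  exact foldl_insertBy_map g _ l []

-- A's three chained filters equal B's single combined filter
lemma filters_eq (restaurants : List (List Int)) (veganFriendly maxPrice maxDistance : Int) :
    ((((if veganFriendly = 1 then
          restaurants.filter (fun x => decide (PySem.List.pyGetD x 2 0 = veganFriendly))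
        else restaurants).filter
          (fun x => decide (PySem.List.pyGetD x 3 0 ≤ maxPrice))).filter
          (fun x => decide (PySem.List.pyGetD x 4 0 ≤ maxDistance))))
      = restaurants.filter (fun r =>
          decide ((veganFriendly ≠ 1 ∨ PySem.List.pyGetD r 2 0 = 1)
            ∧ PySem.List.pyGetD r 3 0 ≤ maxPrice
            ∧ PySem.List.pyGetD r 4 0 ≤ maxDistance)) := by
  by_cases h : veganFriendly = 1
  · subst h
    rw [if_pos rfl]
    simp only [List.filter_filter]
    refine List.filter_congr (fun x _ => ?_)
    rw [Bool.eq_iff_iff]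
    simp only [Bool.and_eq_true, decide_eq_true_eq]
    tauto
  · rw [if_neg h]
    simp only [List.filter_filter]
    refine List.filter_congr (fun x _ => ?_)
    rw [Bool.eq_iff_iff]
    simp only [Bool.and_eq_true, decide_eq_true_eq]
    tauto

-- ===== VERDICT (by name: the statement is the Claim_ definition above) =====
theorem filterRestaurants_spec : Claim_equal_filterRestaurants := by
  intro restaurants veganFriendly maxPrice maxDistance _ _
  unfold Spec_filterRestaurants filterRestaurants filterRestaurants_alt
  simp only [PySem.List.foldl_append_ite_eq_filter, List.nil_append]
  rw [filters_eq restaurants veganFriendly maxPrice maxDistance]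
  rw [foldl_filter_map]
  set F := restaurants.filter (fun r =>
    decide ((veganFriendly ≠ 1 ∨ PySem.List.pyGetD r 2 0 = 1)
      ∧ PySem.List.pyGetD r 3 0 ≤ maxPrice
      ∧ PySem.List.pyGetD r 4 0 ≤ maxDistance)) with hF
  by_cases hE : F = []
  · simp [hE]
  · rw [if_neg hE, ← fold_asc_reverse_eq,
        sorted2_map (fun r => (PySem.List.pyGetD r 1 0, PySem.List.pyGetD r 0 0))
          Prod.fst Prod.snd F,
        List.map_map]
    rfl
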